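-- pv_equiv track=rewrite | github.com/CaioBadner/Damas | Damas/Damas/Engine/GameState.py | getNewBoard
-- ===== SOURCE A (Python) =====
-- def getNewBoard(boardSize, whitePieces, blackPieces):
--     board = [[0 for i in range(boardSize)] for j in range(boardSize)]
--     midRows = (boardSize // 2 - 1, boardSize // 2)
--     for r in range(boardSize):
--         for c in range(boardSize):
--             if (r+c) % 2 != 0:
--                 if r in midRows:
--                     board[r][c] = 0
--                 elif r < midRows[0]:
--                     board[r][c] = blackPieces.pop()
--                 else:
--                     board[r][c] = whitePieces.pop()
--     return board
-- ===== SOURCE B (Python) =====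
-- def getNewBoard(boardSize, whitePieces, blackPieces):
--     board = [[0] * boardSize for _ in range(boardSize)]
--     mid = boardSize // 2
--     for r in range(0, mid - 1):
--         for c in range(1 - r % 2, boardSize, 2):
--             board[r][c] = blackPieces.pop()
--     for r in range(mid + 1, boardSize):
--         for c in range(1 - r % 2, boardSize, 2):
--             board[r][c] = whitePieces.pop()
--     return board
-- ===== Notes on version B (the rewrite author's own statement) =====
-- stated objective: simpler
-- what changed: A scans all n*n cells testing (r+c)%2 and re-deciding the row region inside the loop; B loops only over the two piece regions (rows < n//2-1 and rows > n//2) and strides directly over the dark columns in steps of 2, so the parity test and the region branch disappear and the mid rows are never visited.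
import Mathlib
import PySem

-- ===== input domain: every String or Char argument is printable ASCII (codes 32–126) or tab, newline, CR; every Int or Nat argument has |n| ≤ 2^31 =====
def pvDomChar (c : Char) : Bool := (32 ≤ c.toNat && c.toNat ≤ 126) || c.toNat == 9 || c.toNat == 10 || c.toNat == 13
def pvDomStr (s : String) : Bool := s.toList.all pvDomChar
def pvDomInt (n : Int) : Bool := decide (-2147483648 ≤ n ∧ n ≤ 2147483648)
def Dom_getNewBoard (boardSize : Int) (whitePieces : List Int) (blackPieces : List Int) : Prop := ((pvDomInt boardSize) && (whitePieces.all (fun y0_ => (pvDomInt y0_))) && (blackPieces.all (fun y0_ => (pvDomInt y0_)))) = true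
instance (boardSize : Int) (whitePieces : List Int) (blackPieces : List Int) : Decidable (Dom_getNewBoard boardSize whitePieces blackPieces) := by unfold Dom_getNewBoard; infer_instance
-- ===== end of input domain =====

-- B replaces A's full n×n scan with per-cell parity test and in-loop region branch by two
-- region loops striding directly over the dark squares (objective: simpler).  Both A and B
-- pop from the two piece lists; the equivalence proved is about the RETURN value (the two
-- Pythons perform the identical pops, so the argument mutation coincides as well).

-- ===== PORT A =====
-- board[r][c] = v  (exact for the in-range non-negative indices r,c ∈ range(n) both Pythons produce)
def pvSet2 (board : List (List Int)) (r c : Int) (v : Int) : List (List Int) :=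
  board.set r.toNat ((board.getD r.toNat []).set c.toNat v)

-- body of A's inner loop; state none = the Python has raised IndexError (pop from empty list)
def pvCellA (midRows : Int × Int) (r : Int)
    (st : Option (List (List Int) × List Int × List Int)) (c : Int) :
    Option (List (List Int) × List Int × List Int) :=
  match st with
  | none => none
  | some (board, white, black) =>
    if PySem.Int.mod (r + c) 2 ≠ 0 then
      if r = midRows.1 ∨ r = midRows.2 then some (pvSet2 board r c 0, white, black)
      else if r < midRows.1 then
        match PySem.List.pop? black with
        | none => none
        | some vb => some (pvSet2 board r c vb.1, white, vb.2)
      else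
        match PySem.List.pop? white with
        | none => none
        | some vw => some (pvSet2 board r c vw.1, vw.2, black)
    else some (board, white, black)

def pvRowA (n : Int) (midRows : Int × Int) (r : Int)
    (st : Option (List (List Int) × List Int × List Int)) :
    Option (List (List Int) × List Int × List Int) :=
  (PySem.List.pyRange 0 n 1).foldl (pvCellA midRows r) st

def getNewBoard (boardSize : Int) (whitePieces : List Int) (blackPieces : List Int) : List (List Int) :=
  let board := (PySem.List.pyRange 0 boardSize 1).map
    (fun _ => (PySem.List.pyRange 0 boardSize 1).map (fun _ => (0 : Int)))
  let midRows := (PySem.Int.floordiv boardSize 2 - 1, PySem.Int.floordiv boardSize 2)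
  match (PySem.List.pyRange 0 boardSize 1).foldl (fun st r => pvRowA boardSize midRows r st)
      (some (board, whitePieces, blackPieces)) with
  | some res => res.1
  | none => []          -- unreached under Pre_ (the Python raises IndexError there)

-- ===== PORT B =====
-- body of B's inner loops (identical in both loops of Source B, for the respective piece list)
def pvCellB (r : Int) (st : Option (List (List Int) × List Int)) (c : Int) :
    Option (List (List Int) × List Int) :=
  match st with
  | none => none
  | some (board, p) =>
    match PySem.List.pop? p with
    | none => none
    | some vp => some (pvSet2 board r c vp.1, vp.2)

def pvRowB (n : Int) (r : Int) (st : Option (List (List Int) × List Int)) :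
    Option (List (List Int) × List Int) :=
  (PySem.List.pyRange (1 - PySem.Int.mod r 2) n 2).foldl (pvCellB r) st

def getNewBoard_alt (boardSize : Int) (whitePieces : List Int) (blackPieces : List Int) : List (List Int) :=
  let board := (PySem.List.pyRange 0 boardSize 1).map
    (fun _ => List.replicate boardSize.toNat (0 : Int))
  let mid := PySem.Int.floordiv boardSize 2
  match (PySem.List.pyRange 0 (mid - 1) 1).foldl (fun st r => pvRowB boardSize r st)
      (some (board, blackPieces)) with
  | none => []
  | some x =>
    match (PySem.List.pyRange (mid + 1) boardSize 1).foldl (fun st r => pvRowB boardSize r st)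
        (some (x.1, whitePieces)) with
    | none => []
    | some y => y.1

-- ===== PRECONDITION & SPEC =====
-- number of dark squares in an even / odd row of an n-wide board
def pvDarkEven (n : Int) : Int := PySem.Int.floordiv n 2
def pvDarkOdd (n : Int) : Int := n - PySem.Int.floordiv n 2
-- pieces consumed from blackPieces (rows 0 … n//2-2) resp. whitePieces (rows n//2+1 … n-1)
def pvBlackNeeded (n : Int) : Int :=
  if n ≤ 0 then 0 else
    (PySem.Int.floordiv (PySem.Int.floordiv n 2) 2) * pvDarkEven n +
    (max (PySem.Int.floordiv n 2 - 1) 0 - PySem.Int.floordiv (PySem.Int.floordiv n 2) 2) * pvDarkOdd n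
def pvWhiteNeeded (n : Int) : Int :=
  if n ≤ 0 then 0 else
    (PySem.Int.floordiv (n + 1) 2 - PySem.Int.floordiv (PySem.Int.floordiv n 2 + 2) 2) * pvDarkEven n +
    (max (n - PySem.Int.floordiv n 2 - 1) 0 -
      (PySem.Int.floordiv (n + 1) 2 - PySem.Int.floordiv (PySem.Int.floordiv n 2 + 2) 2)) * pvDarkOdd n

-- Pre_ excludes exactly the inputs where A raises IndexError: a piece list shorter than the
-- number of dark squares in its region (pop from an empty list).
def Pre_getNewBoard (boardSize : Int) (whitePieces : List Int) (blackPieces : List Int) : Prop :=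
  pvBlackNeeded boardSize ≤ (blackPieces.length : Int) ∧
  pvWhiteNeeded boardSize ≤ (whitePieces.length : Int)
instance (boardSize : Int) (whitePieces : List Int) (blackPieces : List Int) : Decidable (Pre_getNewBoard boardSize whitePieces blackPieces) := by unfold Pre_getNewBoard; infer_instance

def pvWitness_getNewBoard : Int × List Int × List Int :=
  (8, [1, 2, 3, 4, 5, 6, 7, 8, 9, 10, 11, 12], [21, 22, 23, 24, 25, 26, 27, 28, 29, 30, 31, 32])

def Spec_getNewBoard (boardSize : Int) (whitePieces : List Int) (blackPieces : List Int) (out : List (List Int)) : Prop := out = getNewBoard_alt boardSize whitePieces blackPieces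
instance (boardSize : Int) (whitePieces : List Int) (blackPieces : List Int) (out : List (List Int)) : Decidable (Spec_getNewBoard boardSize whitePieces blackPieces out) := by unfold Spec_getNewBoard; infer_instance

-- ===== CLAIM (what is proved, stated in full; the proofs are below) =====
def Claim_equal_getNewBoard : Prop := ∀ (boardSize : Int) (whitePieces : List Int) (blackPieces : List Int), Dom_getNewBoard boardSize whitePieces blackPieces → Pre_getNewBoard boardSize whitePieces blackPieces → Spec_getNewBoard boardSize whitePieces blackPieces (getNewBoard boardSize whitePieces blackPieces)

-- ===== LEMMAS AND PROOFS =====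

-- generic option-fold facts
theorem pvFoldlNone {α β : Type} (f : Option α → β → Option α)
    (h : ∀ c, f none c = none) (l : List β) : l.foldl f none = none := by
  induction l with
  | nil => rfl
  | cons c l ih => rw [List.foldl_cons, h]; exact ih

theorem pvFoldlFixed {α β : Type} (f : α → β → α) (t : α) (l : List β)
    (h : ∀ c ∈ l, f t c = t) : l.foldl f t = t := by
  induction l with
  | nil => rfl
  | cons c l ih =>
    rw [List.foldl_cons, h c (by simp)]
    exact ih (fun c hc => h c (by simp [hc]))

theorem pvRowA_none (n : Int) (mr : Int × Int) (r : Int) : pvRowA n mr r none = none :=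
  pvFoldlNone _ (fun _ => rfl) _

theorem pvRowB_none (n r : Int) : pvRowB n r none = none :=
  pvFoldlNone _ (fun _ => rfl) _

theorem pvFoldA_none (n : Int) (mr : Int × Int) (rs : List Int) :
    rs.foldl (fun st r => pvRowA n mr r st) none = none :=
  pvFoldlNone _ (fun r => pvRowA_none n mr r) rs

theorem pvFoldB_none (n : Int) (rs : List Int) :
    rs.foldl (fun st r => pvRowB n r st) none = none :=
  pvFoldlNone _ (fun r => pvRowB_none n r) rs

-- two strictly increasing integer lists with the same members are equal
theorem pvSortedUnique (xs ys : List Int)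
    (hx : List.Pairwise (· < ·) xs) (hy : List.Pairwise (· < ·) ys)
    (hmem : ∀ a, a ∈ xs ↔ a ∈ ys) : xs = ys := by
  have hnx : xs.Nodup := hx.imp (fun h => ne_of_lt h)
  have hny : ys.Nodup := hy.imp (fun h => ne_of_lt h)
  have hperm : ys.Perm xs := (List.perm_ext_iff_of_nodup hny hnx).mpr (fun a => (hmem a).symm)
  have h1 : PySem.List.sorted xs (fun x => x) = xs :=
    PySem.List.sorted_eq_of_perm_of_pairwise_lt xs xs (fun x => x) (List.Perm.refl xs) hx
  have h2 : PySem.List.sorted xs (fun x => x) = ys :=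
    PySem.List.sorted_eq_of_perm_of_pairwise_lt xs ys (fun x => x) hperm hy
  rw [← h1, h2]

-- the dark columns of row r, by parity test and by stride-2 range, coincide
theorem pvFilterDark (n r : Int) (hr : 0 ≤ r) :
    (PySem.List.pyRange 0 n 1).filter (fun c => decide (PySem.Int.mod (r + c) 2 ≠ 0))
    = PySem.List.pyRange (1 - PySem.Int.mod r 2) n 2 := by
  have h2 : (0 : Int) < 2 := by norm_num
  refine pvSortedUnique _ _ ?_ ?_ ?_
  · exact (PySem.List.pairwise_lt_pyRange_one 0 n).filter _
  · rw [PySem.List.pyRange_of_pos _ _ h2]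
    refine List.pairwise_map.mpr ?_
    exact List.pairwise_lt_range.imp (fun h => by omega)
  · intro a
    rw [List.mem_filter, PySem.List.mem_pyRange_iff_of_pos h2]
    rw [PySem.List.mem_pyRange_one]
    simp only [decide_eq_true_eq]
    rw [PySem.Int.mod_eq_emod_of_pos h2, PySem.Int.mod_eq_emod_of_pos h2]
    omega

-- pvSet2 facts
theorem pvSetGetD (board : List (List Int)) (i : Nat) :
    board.set i (board.getD i []) = board := by
  by_cases h : i < board.length
  · rw [List.getD_eq_getElem?_getD, List.getElem?_eq_getElem h, Option.getD_some]
    exact List.set_getElem_self h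
  · exact List.set_eq_of_length_le (by omega)

theorem pvSet2_getD (board : List (List Int)) (r c : Int) (v : Int) :
    (pvSet2 board r c v).getD r.toNat [] = (board.getD r.toNat []).set c.toNat v := by
  unfold pvSet2
  by_cases h : r.toNat < board.length
  · simp [List.getD_eq_getElem?_getD, h]
  · rw [List.set_eq_of_length_le (by omega)]
    rw [List.getD_eq_getElem?_getD, List.getElem?_eq_none (by omega)]
    rfl

theorem pvSet2_set (board : List (List Int)) (r c : Int) (v : Int) (row : List Int) :
    (pvSet2 board r c v).set r.toNat row = board.set r.toNat row := by
  unfold pvSet2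
  exact List.set_set _

-- single-row fill (proof-side reference shape)
def pvFillRow (cs : List Int) (st : Option (List Int × List Int)) : Option (List Int × List Int) :=
  cs.foldl (fun st c =>
    match st with
    | none => none
    | some rp =>
      match PySem.List.pop? rp.2 with
      | none => none
      | some vp => some (rp.1.set c.toNat vp.1, vp.2)) st

theorem pvRowCore (r : Int) (cs : List Int) (board : List (List Int)) (p : List Int) :
    cs.foldl (pvCellB r) (some (board, p))
    = match pvFillRow cs (some (board.getD r.toNat [], p)) with
      | none => none
      | some x => some (board.set r.toNat x.1, x.2) := by
  induction cs generalizing board p with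
  | nil =>
    show some (board, p) = some (board.set r.toNat (board.getD r.toNat []), p)
    rw [pvSetGetD]
  | cons c cs ih =>
    rw [List.foldl_cons]
    show cs.foldl (pvCellB r) (pvCellB r (some (board, p)) c) = _
    cases hp : PySem.List.pop? p with
    | none =>
      have hcell : pvCellB r (some (board, p)) c = none := by simp [pvCellB, hp]
      rw [hcell, pvFoldlNone _ (fun _ => rfl)]
      have hfill : pvFillRow (c :: cs) (some (board.getD r.toNat [], p)) = none := by
        unfold pvFillRow
        rw [List.foldl_cons]
        simp only [hp]
        exact pvFoldlNone _ (fun _ => rfl) _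
      rw [hfill]
    | some vp =>
      have hcell : pvCellB r (some (board, p)) c = some (pvSet2 board r c vp.1, vp.2) := by
        simp [pvCellB, hp]
      rw [hcell, ih]
      have hfill : pvFillRow (c :: cs) (some (board.getD r.toNat [], p))
          = pvFillRow cs (some ((board.getD r.toNat []).set c.toNat vp.1, vp.2)) := by
        unfold pvFillRow
        rw [List.foldl_cons]
        simp only [hp]
      rw [hfill, pvSet2_getD]
      cases hfr : pvFillRow cs (some ((board.getD r.toNat []).set c.toNat vp.1, vp.2)) with
      | none => rfl
      | some x => simp only []; rw [pvSet2_set]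

-- A's inner loop in the two pop regions, lifted to B's pair state
theorem pvTripleTop (r : Int) (cs : List Int) (bd : List (List Int)) (w b : List Int) :
    cs.foldl (fun st c =>
        match st with
        | none => none
        | some t =>
          match PySem.List.pop? t.2.2 with
          | none => none
          | some vb => some (pvSet2 t.1 r c vb.1, t.2.1, vb.2)) (some (bd, w, b))
    = match cs.foldl (pvCellB r) (some (bd, b)) with
      | none => none
      | some x => some (x.1, w, x.2) := by
  induction cs generalizing bd b with
  | nil => rfl
  | cons c cs ih =>
    rw [List.foldl_cons, List.foldl_cons]
    cases hp : PySem.List.pop? b with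
    | none =>
      simp only [pvCellB, hp]
      rw [pvFoldlNone _ (fun _ => rfl), pvFoldlNone _ (fun _ => rfl)]
    | some vp =>
      simp only [hp, pvCellB]
      exact ih (pvSet2 bd r c vp.1) vp.2

theorem pvTripleBot (r : Int) (cs : List Int) (bd : List (List Int)) (w b : List Int) :
    cs.foldl (fun st c =>
        match st with
        | none => none
        | some t =>
          match PySem.List.pop? t.2.1 with
          | none => none
          | some vw => some (pvSet2 t.1 r c vw.1, vw.2, t.2.2)) (some (bd, w, b))
    = match cs.foldl (pvCellB r) (some (bd, w)) with
      | none => none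
      | some x => some (x.1, x.2, b) := by
  induction cs generalizing bd w with
  | nil => rfl
  | cons c cs ih =>
    rw [List.foldl_cons, List.foldl_cons]
    cases hp : PySem.List.pop? w with
    | none =>
      simp only [pvCellB, hp]
      rw [pvFoldlNone _ (fun _ => rfl), pvFoldlNone _ (fun _ => rfl)]
    | some vp =>
      simp only [hp, pvCellB]
      exact ih (pvSet2 bd r c vp.1) vp.2

-- A's inner loop with the region branch resolved: skip-even fold = fold over the filtered columns
theorem pvFoldTopIf (r : Int) (l : List Int)
    (st : Option (List (List Int) × List Int × List Int)) :
    l.foldl (fun st c =>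
      match st with
      | none => none
      | some t =>
        if PySem.Int.mod (r + c) 2 ≠ 0 then
          (match PySem.List.pop? t.2.2 with
           | none => none
           | some vb => some (pvSet2 t.1 r c vb.1, t.2.1, vb.2))
        else some t) st
    = (l.filter (fun c => decide (PySem.Int.mod (r + c) 2 ≠ 0))).foldl (fun st c =>
      match st with
      | none => none
      | some t =>
        match PySem.List.pop? t.2.2 with
        | none => none
        | some vb => some (pvSet2 t.1 r c vb.1, t.2.1, vb.2)) st := by
  induction l generalizing st with
  | nil => rfl
  | cons c l ih =>
    cases st with
    | none =>
      rw [List.foldl_cons]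
      rw [pvFoldlNone _ (fun _ => rfl), pvFoldlNone _ (fun _ => rfl)]
    | some t =>
      by_cases hp : PySem.Int.mod (r + c) 2 = 0
      · simp only [List.foldl_cons, List.filter_cons, hp]
        simp only [ne_eq, not_true_eq_false, if_false, decide_false, Bool.false_eq_true]
        exact ih _
      · simp only [List.foldl_cons, List.filter_cons, if_pos hp]
        simp only [ne_eq, hp, not_false_eq_true, if_true, decide_true, List.foldl_cons]
        exact ih _

theorem pvFoldBotIf (r : Int) (l : List Int)
    (st : Option (List (List Int) × List Int × List Int)) :
    l.foldl (fun st c =>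
      match st with
      | none => none
      | some t =>
        if PySem.Int.mod (r + c) 2 ≠ 0 then
          (match PySem.List.pop? t.2.1 with
           | none => none
           | some vw => some (pvSet2 t.1 r c vw.1, vw.2, t.2.2))
        else some t) st
    = (l.filter (fun c => decide (PySem.Int.mod (r + c) 2 ≠ 0))).foldl (fun st c =>
      match st with
      | none => none
      | some t =>
        match PySem.List.pop? t.2.1 with
        | none => none
        | some vw => some (pvSet2 t.1 r c vw.1, vw.2, t.2.2)) st := by
  induction l generalizing st with
  | nil => rfl
  | cons c l ih =>
    cases st with
    | none =>
      rw [List.foldl_cons]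
      rw [pvFoldlNone _ (fun _ => rfl), pvFoldlNone _ (fun _ => rfl)]
    | some t =>
      by_cases hp : PySem.Int.mod (r + c) 2 = 0
      · simp only [List.foldl_cons, List.filter_cons, hp]
        simp only [ne_eq, not_true_eq_false, if_false, decide_false, Bool.false_eq_true]
        exact ih _
      · simp only [List.foldl_cons, List.filter_cons, if_pos hp]
        simp only [ne_eq, hp, not_false_eq_true, if_true, decide_true, List.foldl_cons]
        exact ih _

theorem pvRowA_top (n m r : Int) (h0 : 0 ≤ r) (hr : r < m - 1)
    (bd : List (List Int)) (w b : List Int) :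
    pvRowA n (m - 1, m) r (some (bd, w, b))
    = match pvRowB n r (some (bd, b)) with
      | none => none
      | some x => some (x.1, w, x.2) := by
  unfold pvRowA
  have hcell : pvCellA (m - 1, m) r = (fun st c =>
      match st with
      | none => none
      | some t =>
        if PySem.Int.mod (r + c) 2 ≠ 0 then
          (match PySem.List.pop? t.2.2 with
           | none => none
           | some vb => some (pvSet2 t.1 r c vb.1, t.2.1, vb.2))
        else some t) := by
    funext st c
    cases st with
    | none => rfl
    | some t =>
      obtain ⟨bd', w', b'⟩ := t
      simp only [pvCellA]
      by_cases hodd : PySem.Int.mod (r + c) 2 ≠ 0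
      · rw [if_pos hodd, if_pos hodd,
          if_neg (show ¬(r = m - 1 ∨ r = m) by omega),
          if_pos (show r < m - 1 from hr)]
      · rw [if_neg hodd, if_neg hodd]
  rw [hcell, pvFoldTopIf, pvFilterDark n r h0]
  simp only [pvRowB]
  exact pvTripleTop r _ bd w b

theorem pvRowA_bot (n m r : Int) (h0 : 0 ≤ r) (hr : m < r)
    (bd : List (List Int)) (w b : List Int) :
    pvRowA n (m - 1, m) r (some (bd, w, b))
    = match pvRowB n r (some (bd, w)) with
      | none => none
      | some x => some (x.1, x.2, b) := by
  unfold pvRowA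
  have hcell : pvCellA (m - 1, m) r = (fun st c =>
      match st with
      | none => none
      | some t =>
        if PySem.Int.mod (r + c) 2 ≠ 0 then
          (match PySem.List.pop? t.2.1 with
           | none => none
           | some vw => some (pvSet2 t.1 r c vw.1, vw.2, t.2.2))
        else some t) := by
    funext st c
    cases st with
    | none => rfl
    | some t =>
      obtain ⟨bd', w', b'⟩ := t
      simp only [pvCellA]
      by_cases hodd : PySem.Int.mod (r + c) 2 ≠ 0
      · rw [if_pos hodd, if_pos hodd,
          if_neg (show ¬(r = m - 1 ∨ r = m) by omega),
          if_neg (show ¬(r < m - 1) by omega)]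
      · rw [if_neg hodd, if_neg hodd]
  rw [hcell, pvFoldBotIf, pvFilterDark n r h0]
  simp only [pvRowB]
  exact pvTripleBot r _ bd w b

theorem pvRowA_mid (n m r : Int) (hmid : r = m - 1 ∨ r = m)
    (bd : List (List Int)) (w b : List Int)
    (hrow : bd.getD r.toNat [] = List.replicate n.toNat 0) :
    pvRowA n (m - 1, m) r (some (bd, w, b)) = some (bd, w, b) := by
  unfold pvRowA
  apply pvFoldlFixed
  intro c _
  simp only [pvCellA]
  by_cases hodd : PySem.Int.mod (r + c) 2 ≠ 0
  · rw [if_pos hodd, if_pos (show r = m - 1 ∨ r = m from hmid)]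
    unfold pvSet2
    rw [hrow, List.set_replicate_self, ← hrow, pvSetGetD]
  · rw [if_neg hodd]

-- B's row loop touches only row r of the board
theorem pvRowB_preserve (n r : Int) (bd : List (List Int)) (p : List Int)
    (res : List (List Int) × List Int) (t : Nat) (ht : r.toNat ≠ t)
    (h : pvRowB n r (some (bd, p)) = some res) :
    res.1.getD t [] = bd.getD t [] := by
  unfold pvRowB at h
  rw [pvRowCore] at h
  cases hfr : pvFillRow (PySem.List.pyRange (1 - PySem.Int.mod r 2) n 2)
      (some (bd.getD r.toNat [], p)) with
  | none => rw [hfr] at h; exact absurd h (by simp)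
  | some x =>
    rw [hfr] at h
    cases h
    simp [List.getD_eq_getElem?_getD, List.getElem?_set_ne ht]

theorem pvFoldB_preserve (n : Int) (rs : List Int) (bd : List (List Int)) (p : List Int)
    (res : List (List Int) × List Int) (t : Nat) (ht : ∀ r ∈ rs, r.toNat ≠ t)
    (h : rs.foldl (fun st r => pvRowB n r st) (some (bd, p)) = some res) :
    res.1.getD t [] = bd.getD t [] := by
  induction rs generalizing bd p with
  | nil => cases h; rfl
  | cons r rs ih =>
    rw [List.foldl_cons] at h
    cases hv : pvRowB n r (some (bd, p)) with
    | none =>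
      rw [hv, pvFoldB_none] at h
      exact absurd h (by simp)
    | some y =>
      rw [hv] at h
      exact (ih y.1 y.2 (fun r' hr' => ht r' (by simp [hr'])) h).trans
        (pvRowB_preserve n r bd p y t (ht r (by simp)) hv)

-- the three row regions of A's outer loop
theorem pvSegTop (n m : Int) (rs : List Int) (h : ∀ r ∈ rs, 0 ≤ r ∧ r < m - 1) :
    ∀ (bd : List (List Int)) (w b : List Int),
    rs.foldl (fun st r => pvRowA n (m - 1, m) r st) (some (bd, w, b))
    = match rs.foldl (fun st r => pvRowB n r st) (some (bd, b)) with
      | none => none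
      | some x => some (x.1, w, x.2) := by
  induction rs with
  | nil => intro bd w b; rfl
  | cons r rs ih =>
    intro bd w b
    rw [List.foldl_cons, List.foldl_cons]
    obtain ⟨h0, hr⟩ := h r (by simp)
    rw [pvRowA_top n m r h0 hr]
    cases hv : pvRowB n r (some (bd, b)) with
    | none =>
      simp only [hv]
      rw [pvFoldA_none, pvFoldB_none]
    | some y =>
      simp only [hv]
      exact ih (fun r' hr' => h r' (by simp [hr'])) y.1 w y.2

theorem pvSegBot (n m : Int) (rs : List Int) (h : ∀ r ∈ rs, 0 ≤ r ∧ m < r) :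
    ∀ (bd : List (List Int)) (w b : List Int),
    rs.foldl (fun st r => pvRowA n (m - 1, m) r st) (some (bd, w, b))
    = match rs.foldl (fun st r => pvRowB n r st) (some (bd, w)) with
      | none => none
      | some x => some (x.1, x.2, b) := by
  induction rs with
  | nil => intro bd w b; rfl
  | cons r rs ih =>
    intro bd w b
    rw [List.foldl_cons, List.foldl_cons]
    obtain ⟨h0, hr⟩ := h r (by simp)
    rw [pvRowA_bot n m r h0 hr]
    cases hv : pvRowB n r (some (bd, w)) with
    | none =>
      simp only [hv]
      rw [pvFoldA_none, pvFoldB_none]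
    | some y =>
      simp only [hv]
      exact ih (fun r' hr' => h r' (by simp [hr'])) y.1 y.2 b

theorem pvSegMid (n m : Int) (rs : List Int) (bd : List (List Int)) (w b : List Int)
    (h : ∀ r ∈ rs, (r = m - 1 ∨ r = m) ∧ bd.getD r.toNat [] = List.replicate n.toNat 0) :
    rs.foldl (fun st r => pvRowA n (m - 1, m) r st) (some (bd, w, b)) = some (bd, w, b) := by
  apply pvFoldlFixed
  intro r hr
  exact pvRowA_mid n m r (h r hr).1 bd w b (h r hr).2

theorem pvBoard0 (n : Int) :
    (PySem.List.pyRange 0 n 1).map (fun _ => (PySem.List.pyRange 0 n 1).map (fun _ => (0 : Int)))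
    = List.replicate n.toNat (List.replicate n.toNat 0) := by
  simp [List.map_const', PySem.List.length_pyRange_one]

theorem pvBoard0' (n : Int) :
    (PySem.List.pyRange 0 n 1).map (fun _ => List.replicate n.toNat (0 : Int))
    = List.replicate n.toNat (List.replicate n.toNat 0) := by
  simp [List.map_const', PySem.List.length_pyRange_one]

theorem pvRepGetD (k t : Nat) (h : t < k) :
    (List.replicate k (List.replicate k (0 : Int))).getD t [] = List.replicate k 0 := by
  simp [List.getD_eq_getElem?_getD, h]

theorem pvMain (boardSize : Int) (whitePieces blackPieces : List Int) :
    getNewBoard boardSize whitePieces blackPieces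
    = getNewBoard_alt boardSize whitePieces blackPieces := by
  have h2 : (0 : Int) < 2 := by norm_num
  have hfd : PySem.Int.floordiv boardSize 2 = boardSize / 2 :=
    PySem.Int.floordiv_eq_ediv_of_pos h2
  simp only [getNewBoard, getNewBoard_alt, hfd]
  by_cases hn : boardSize ≤ 0
  · rw [PySem.List.pyRange_one_eq_nil (show boardSize ≤ 0 from hn),
      PySem.List.pyRange_one_eq_nil (show boardSize / 2 - 1 ≤ 0 by omega),
      PySem.List.pyRange_one_eq_nil (show boardSize ≤ boardSize / 2 + 1 by omega)]
    rfl
  · rw [not_le] at hn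
    set m := boardSize / 2 with hm
    have hmn : m < boardSize := by omega
    set lo := max 0 (m - 1) with hlo
    have hsplit : PySem.List.pyRange 0 boardSize 1
        = (PySem.List.pyRange 0 lo 1 ++ PySem.List.pyRange lo (m + 1) 1)
          ++ PySem.List.pyRange (m + 1) boardSize 1 := by
      rw [← PySem.List.pyRange_one_append 0 lo (m + 1) (by omega) (by omega),
        ← PySem.List.pyRange_one_append 0 (m + 1) boardSize (by omega) (by omega)]
    have hB1 : PySem.List.pyRange 0 (m - 1) 1 = PySem.List.pyRange 0 lo 1 := by
      rcases (show lo = m - 1 ∨ (lo = 0 ∧ m - 1 ≤ 0) by omega) with h | h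
      · rw [h]
      · rw [PySem.List.pyRange_one_eq_nil (by omega),
          PySem.List.pyRange_one_eq_nil (by omega)]
    rw [pvBoard0, pvBoard0', hB1]
    conv_lhs => rw [hsplit]
    rw [List.foldl_append, List.foldl_append]
    rw [pvSegTop boardSize m (PySem.List.pyRange 0 lo 1)
      (fun r hr => by rw [PySem.List.mem_pyRange_one] at hr; omega)]
    cases hv : (PySem.List.pyRange 0 lo 1).foldl (fun st r => pvRowB boardSize r st)
        (some (List.replicate boardSize.toNat (List.replicate boardSize.toNat 0),
          blackPieces)) with
    | none =>
      simp only [hv]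
      rw [pvFoldA_none, pvFoldA_none]
    | some x =>
      simp only [hv]
      have hmidrows : ∀ r ∈ PySem.List.pyRange lo (m + 1) 1,
          (r = m - 1 ∨ r = m) ∧ x.1.getD r.toNat [] = List.replicate boardSize.toNat 0 := by
        intro r hr
        rw [PySem.List.mem_pyRange_one] at hr
        refine ⟨by omega, ?_⟩
        have hp := pvFoldB_preserve boardSize (PySem.List.pyRange 0 lo 1) _ blackPieces x
          r.toNat (fun r' hr' => by rw [PySem.List.mem_pyRange_one] at hr'; omega) hv
        rw [hp]
        exact pvRepGetD boardSize.toNat r.toNat (by omega)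
      rw [pvSegMid boardSize m (PySem.List.pyRange lo (m + 1) 1) x.1 whitePieces x.2 hmidrows]
      rw [pvSegBot boardSize m (PySem.List.pyRange (m + 1) boardSize 1)
        (fun r hr => by rw [PySem.List.mem_pyRange_one] at hr; omega)]
      cases hv2 : (PySem.List.pyRange (m + 1) boardSize 1).foldl
          (fun st r => pvRowB boardSize r st) (some (x.1, whitePieces)) with
      | none => simp only [hv2]
      | some y => simp only [hv2]

-- ===== VERDICT (by name: the statement is the Claim_ definition above) =====
theorem getNewBoard_spec : Claim_equal_getNewBoard := by
  intro boardSize whitePieces blackPieces _ _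
  unfold Spec_getNewBoard
  exact pvMain boardSize whitePieces blackPieces
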